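-- pv_equiv track=rewrite | github.com/OsaidM/rainmeter_organiser_script | @Resources/organize.py | pick_a_category
-- ===== SOURCE A (Python) =====
-- def pick_a_category(ext):
--     # different types of extensions for each category, might update them in future
--     all_ext_categories = {
--         'Documents': {'.pptx', '.doc', '.docx', '.pdf', '.xlsx', '.xls', '.ppt', '.odt', '.odg'},
--         'Programs': {'.exe', '.msi', '.jar'},
--         'Compressed': {'.zip', '.rar', '.7z', '.tar'},
--         'Pictures': {'.gif', '.png', '.jpg', '.jpeg'},
--         'Video': {
--             '.mp4', '.mkv', '.mov', '.avi', '.flv',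
--             '.webm', '.f4v', '.avchd', '.mpeg-2'
--             },
--         'Music': {'.mp3', '.aac', '.ogg', '.flac', '.alac', '.wav', '.m4a', '.wma'}
--     }
--     for key, val in all_ext_categories.items():
--         if ext.lower() in val:
--             return key
--     return None
-- ===== SOURCE B (Python) =====
-- # One flat extension -> category table; lookup is a single dict.get, no loop over categories.
-- _EXT_TO_CATEGORY = {
--     '.pptx': 'Documents', '.doc': 'Documents', '.docx': 'Documents', '.pdf': 'Documents',
--     '.xlsx': 'Documents', '.xls': 'Documents', '.ppt': 'Documents', '.odt': 'Documents',
--     '.odg': 'Documents',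
--     '.exe': 'Programs', '.msi': 'Programs', '.jar': 'Programs',
--     '.zip': 'Compressed', '.rar': 'Compressed', '.7z': 'Compressed', '.tar': 'Compressed',
--     '.gif': 'Pictures', '.png': 'Pictures', '.jpg': 'Pictures', '.jpeg': 'Pictures',
--     '.mp4': 'Video', '.mkv': 'Video', '.mov': 'Video', '.avi': 'Video', '.flv': 'Video',
--     '.webm': 'Video', '.f4v': 'Video', '.avchd': 'Video', '.mpeg-2': 'Video',
--     '.mp3': 'Music', '.aac': 'Music', '.ogg': 'Music', '.flac': 'Music', '.alac': 'Music',
--     '.wav': 'Music', '.m4a': 'Music', '.wma': 'Music',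
-- }
--
-- def pick_a_category(ext):
--     return _EXT_TO_CATEGORY.get(ext.lower())
-- ===== Notes on version B (the rewrite author's own statement) =====
-- stated objective: idiomatic
-- what changed: Replaced the per-category loop with set-membership tests by a single flat extension-to-category dict and one .get() lookup.
import Mathlib
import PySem

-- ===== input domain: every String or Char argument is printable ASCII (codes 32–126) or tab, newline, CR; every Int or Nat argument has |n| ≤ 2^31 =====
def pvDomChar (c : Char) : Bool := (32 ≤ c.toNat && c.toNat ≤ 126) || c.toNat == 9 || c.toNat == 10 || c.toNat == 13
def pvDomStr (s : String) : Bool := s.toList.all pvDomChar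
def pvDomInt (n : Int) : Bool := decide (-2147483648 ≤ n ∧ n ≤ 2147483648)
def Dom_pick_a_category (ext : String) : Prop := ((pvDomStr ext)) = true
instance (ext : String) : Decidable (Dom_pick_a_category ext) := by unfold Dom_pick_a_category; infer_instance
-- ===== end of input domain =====

-- B replaces A's loop over category sets by a single flat extension->category dict lookup; return values identical.
-- ===== PORT A =====
-- the dict literal from A, in insertion order; each value is the Python set of extensions
def pvCatsA : List (String × PySem.Set String) :=
  [("Documents", PySem.Set.ofList [".pptx", ".doc", ".docx", ".pdf", ".xlsx", ".xls", ".ppt", ".odt", ".odg"]),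
   ("Programs", PySem.Set.ofList [".exe", ".msi", ".jar"]),
   ("Compressed", PySem.Set.ofList [".zip", ".rar", ".7z", ".tar"]),
   ("Pictures", PySem.Set.ofList [".gif", ".png", ".jpg", ".jpeg"]),
   ("Video", PySem.Set.ofList [".mp4", ".mkv", ".mov", ".avi", ".flv", ".webm", ".f4v", ".avchd", ".mpeg-2"]),
   ("Music", PySem.Set.ofList [".mp3", ".aac", ".ogg", ".flac", ".alac", ".wav", ".m4a", ".wma"])]

-- the 'for key, val in …: if ext.lower() in val: return key' loop
def pvScanA (cats : List (String × PySem.Set String)) (s : String) : Option String :=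
  match cats with
  | [] => none
  | (key, val) :: rest => if PySem.Set.contains val s then some key else pvScanA rest s

def pick_a_category (ext : String) : Option String :=
  pvScanA pvCatsA (PySem.Str.lower ext)

-- ===== PORT B =====
-- the flat literal dict _EXT_TO_CATEGORY from Source B
def pvExtToCategory : PySem.Dict String String := PySem.Dict.ofList
  [(".pptx", "Documents"), (".doc", "Documents"), (".docx", "Documents"), (".pdf", "Documents"),
   (".xlsx", "Documents"), (".xls", "Documents"), (".ppt", "Documents"), (".odt", "Documents"),
   (".odg", "Documents"),
   (".exe", "Programs"), (".msi", "Programs"), (".jar", "Programs"),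
   (".zip", "Compressed"), (".rar", "Compressed"), (".7z", "Compressed"), (".tar", "Compressed"),
   (".gif", "Pictures"), (".png", "Pictures"), (".jpg", "Pictures"), (".jpeg", "Pictures"),
   (".mp4", "Video"), (".mkv", "Video"), (".mov", "Video"), (".avi", "Video"), (".flv", "Video"),
   (".webm", "Video"), (".f4v", "Video"), (".avchd", "Video"), (".mpeg-2", "Video"),
   (".mp3", "Music"), (".aac", "Music"), (".ogg", "Music"), (".flac", "Music"), (".alac", "Music"),
   (".wav", "Music"), (".m4a", "Music"), (".wma", "Music")]

def pick_a_category_alt (ext : String) : Option String :=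
  PySem.Dict.get? pvExtToCategory (PySem.Str.lower ext)

-- ===== PRECONDITION & SPEC =====
def Spec_pick_a_category (ext : String) (out : Option String) : Prop := out = pick_a_category_alt ext
instance (ext : String) (out : Option String) : Decidable (Spec_pick_a_category ext out) := by unfold Spec_pick_a_category; infer_instance

-- ===== CLAIM (what is proved, stated in full; the proofs are below) =====
def Claim_equal_pick_a_category : Prop := ∀ (ext : String), Dom_pick_a_category ext → Spec_pick_a_category ext (pick_a_category ext)

-- ===== LEMMAS AND PROOFS =====

-- flatten a category table into (extension, category) pairs
def pvFlatten (cats : List (String × PySem.Set String)) : List (String × String) :=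
  cats.flatMap (fun kv => kv.2.map (fun e => (e, kv.1)))

-- first-match lookup in the block of pairs for one category = membership test on its set
theorem pvGetBlock (k : String) (v : List String) (rest : List (String × String)) (s : String) :
    (PySem.Dict.mk (v.map (fun e => (e, k)) ++ rest)).get? s
      = if v.contains s then some k else (PySem.Dict.mk rest).get? s := by
  induction v with
  | nil => simp
  | cons e es ih =>
    simp only [List.map_cons, List.cons_append, PySem.Dict.get?_mk_cons, List.contains_cons, ih,
      beq_iff_eq]
    by_cases h : s = e
    · simp [h]
    · simp [h, Ne.symm h]

-- the per-category scan equals first-match lookup in the flattened table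
theorem pvScanA_eq_flatten (cats : List (String × PySem.Set String)) (s : String) :
    pvScanA cats s = (PySem.Dict.mk (pvFlatten cats)).get? s := by
  induction cats with
  | nil => simp [pvScanA, pvFlatten, PySem.Dict.get?]
  | cons kv rest ih =>
    obtain ⟨k, v⟩ := kv
    simp only [pvScanA, pvFlatten, List.flatMap_cons, pvGetBlock]
    rw [ih]
    rfl

-- B's dict literal is exactly the flattened category table (all keys distinct)
set_option maxRecDepth 20000 in
theorem pvDict_eq : pvExtToCategory = PySem.Dict.mk (pvFlatten pvCatsA) := by decide

-- ===== VERDICT (by name: the statement is the Claim_ definition above) =====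
theorem pick_a_category_spec : Claim_equal_pick_a_category := by
  intro ext _
  unfold Spec_pick_a_category pick_a_category pick_a_category_alt
  rw [pvScanA_eq_flatten, pvDict_eq]
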